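-- pv_equiv track=rewrite | github.com/mudream4869/baidutieba-tool | catchdoc.py | getLastNum
-- ===== SOURCE A (Python) =====
-- def ch2num(ch):
--     arr = "0123456789"
--     for x in range(10):
--         if ch == arr[x]:
--             return x
--     return 0
--
-- def getLastNum(input_str):
--     ret, a10 = 0, 1
--     for ch in input_str[::-1]:
--         if ch != '=':
--             ret = ret + ch2num(ch)*a10
--             a10 *= 10
--         else:
--             break
--     return ret
-- ===== SOURCE B (Python) =====
-- def getLastNum(input_str):
--     # last index of '=' (-1 if absent), found in one forward scan
--     idx = -1
--     for i, ch in enumerate(input_str):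
--         if ch == '=':
--             idx = i
--     ret = 0
--     for ch in input_str[idx + 1:]:
--         ret = ret * 10 + (ord(ch) - 48 if '0' <= ch <= '9' else 0)
--     return ret
-- ===== Notes on version B (the rewrite author's own statement) =====
-- stated objective: simpler
-- what changed: B first locates the delimiter with one forward scan and then converts the suffix with a left-to-right Horner loop (ret = ret*10 + digit), replacing A's reverse scan that keeps an explicit power-of-ten accumulator and calls a 10-way table-scan digit lookup per character.
import Mathlib
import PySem

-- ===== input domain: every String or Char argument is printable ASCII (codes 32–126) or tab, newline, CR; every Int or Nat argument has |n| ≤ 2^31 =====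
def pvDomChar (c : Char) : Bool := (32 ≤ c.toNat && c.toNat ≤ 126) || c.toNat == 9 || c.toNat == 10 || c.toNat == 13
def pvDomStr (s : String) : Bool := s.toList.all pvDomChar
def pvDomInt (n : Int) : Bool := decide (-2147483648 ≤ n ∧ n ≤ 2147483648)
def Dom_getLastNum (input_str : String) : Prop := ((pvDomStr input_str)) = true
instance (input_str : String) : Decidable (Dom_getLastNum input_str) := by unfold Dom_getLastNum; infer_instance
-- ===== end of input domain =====

-- B replaces A's reverse scan (power-of-ten accumulator + 10-way table-scan digit lookup)
-- by a forward scan for the last '=' followed by a left-to-right Horner loop; objective: simpler.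

-- ===== PORT A =====
-- A's ch2num: scan x over range(10) comparing ch with "0123456789"[x]
def ch2numLoop (ch : Char) : List Int → Int
  | [] => 0
  | x :: xs =>
      if PySem.List.pyGet? "0123456789".toList x = some ch then x else ch2numLoop ch xs

def ch2num (ch : Char) : Int := ch2numLoop ch (PySem.List.pyRange 0 10 1)

-- A's for-loop over input_str[::-1] with break at '='
def loopA : List Char → Int → Int → Int
  | [], ret, _ => ret
  | c :: cs, ret, a10 => if c ≠ '=' then loopA cs (ret + ch2num c * a10) (a10 * 10) else ret

def getLastNum (input_str : String) : Int :=
  loopA input_str.toList.reverse 0 1   -- input_str[::-1] is the reverse (PySem.Str.slice?_none_none_neg_one)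

-- ===== PORT B =====
-- B's first loop: last index of '=' in the string, -1 if absent
def lastEqIdx : List Char → Int → Int → Int
  | [], _, idx => idx
  | c :: cs, i, idx => lastEqIdx cs (i + 1) (if c = '=' then i else idx)

-- B's Horner step: ret*10 + (ord(ch)-48 if '0' <= ch <= '9' else 0)
def hornerStep (r : Int) (c : Char) : Int :=
  r * 10 + (if '0' ≤ c ∧ c ≤ '9' then (c.toNat : Int) - 48 else 0)

def getLastNum_alt (input_str : String) : Int :=
  let idx := lastEqIdx input_str.toList 0 (-1)
  let tail := PySem.List.slice input_str.toList (some (idx + 1)) none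
  tail.foldl hornerStep 0

-- ===== PRECONDITION & SPEC =====
def Spec_getLastNum (input_str : String) (out : Int) : Prop := out = getLastNum_alt input_str
instance (input_str : String) (out : Int) : Decidable (Spec_getLastNum input_str out) := by unfold Spec_getLastNum; infer_instance

-- ===== CLAIM (what is proved, stated in full; the proofs are below) =====
def Claim_equal_getLastNum : Prop := ∀ (input_str : String), Dom_getLastNum input_str → Spec_getLastNum input_str (getLastNum input_str)

-- ===== LEMMAS AND PROOFS =====

-- A's digit lookup agrees with B's Horner digit value on every character
theorem ch2num_eq (c : Char) : ch2num c = (if '0' ≤ c ∧ c ≤ '9' then (c.toNat : Int) - 48 else 0) := by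
  have hr : PySem.List.pyRange 0 10 1 = [0,1,2,3,4,5,6,7,8,9] := by decide
  simp only [ch2num, hr, ch2numLoop]
  norm_num [show PySem.List.pyGet? "0123456789".toList (0:Int) = some '0' from by decide,
    show PySem.List.pyGet? "0123456789".toList (1:Int) = some '1' from by decide,
    show PySem.List.pyGet? "0123456789".toList (2:Int) = some '2' from by decide,
    show PySem.List.pyGet? "0123456789".toList (3:Int) = some '3' from by decide,
    show PySem.List.pyGet? "0123456789".toList (4:Int) = some '4' from by decide,
    show PySem.List.pyGet? "0123456789".toList (5:Int) = some '5' from by decide,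
    show PySem.List.pyGet? "0123456789".toList (6:Int) = some '6' from by decide,
    show PySem.List.pyGet? "0123456789".toList (7:Int) = some '7' from by decide,
    show PySem.List.pyGet? "0123456789".toList (8:Int) = some '8' from by decide,
    show PySem.List.pyGet? "0123456789".toList (9:Int) = some '9' from by decide]
  have hle : ∀ a b : Char, (a ≤ b) ↔ a.toNat ≤ b.toNat := fun a b => by
    rw [Char.le_def, UInt32.le_iff_toNat_le]; rfl
  have heq : ∀ a b : Char, a = b ↔ a.toNat = b.toNat := fun a b => by
    rw [Char.ext_iff, ← UInt32.toNat_inj]; rfl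
  simp only [hle, heq, show '0'.toNat = 48 from rfl, show '1'.toNat = 49 from rfl,
    show '2'.toNat = 50 from rfl, show '3'.toNat = 51 from rfl, show '4'.toNat = 52 from rfl,
    show '5'.toNat = 53 from rfl, show '6'.toNat = 54 from rfl, show '7'.toNat = 55 from rfl,
    show '8'.toNat = 56 from rfl, show '9'.toNat = 57 from rfl]
  split_ifs <;> omega

-- generalized-accumulator form of the Horner fold
theorem foldl_hornerStep_acc (l : List Char) (a : Int) :
    l.foldl hornerStep a = a * 10 ^ l.length + l.foldl hornerStep 0 := by
  induction l generalizing a with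
  | nil => simp
  | cons c cs ih =>
    simp only [List.foldl_cons, List.length_cons]
    rw [ih (hornerStep a c), ih (hornerStep 0 c)]
    simp only [hornerStep]
    ring

-- A's reverse loop over an '='-free block, followed by anything
theorem loopA_block (l rest : List Char) (h : '=' ∉ l) (ret a10 : Int) :
    loopA (l.reverse ++ rest) ret a10 = loopA rest (ret + a10 * l.foldl hornerStep 0) (a10 * 10 ^ l.length) := by
  induction l generalizing rest ret a10 with
  | nil => simp [loopA]
  | cons c cs ih =>
    have hc : c ≠ '=' := fun hc => h (hc ▸ List.mem_cons_self)
    have hcs : '=' ∉ cs := fun hm => h (List.mem_cons_of_mem _ hm)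
    simp only [List.reverse_cons, List.append_assoc, List.singleton_append]
    rw [ih (c :: rest) hcs]
    simp only [loopA, hc, if_pos, ne_eq, not_false_iff, List.foldl_cons, List.length_cons]
    rw [foldl_hornerStep_acc cs (hornerStep 0 c)]
    rw [ch2num_eq]
    simp only [hornerStep]
    ring_nf

theorem lastEqIdx_no (l : List Char) (h : '=' ∉ l) (i idx : Int) : lastEqIdx l i idx = idx := by
  induction l generalizing i with
  | nil => rfl
  | cons c cs ih =>
    have hc : c ≠ '=' := fun hc => h (hc ▸ List.mem_cons_self)
    have hcs : '=' ∉ cs := fun hm => h (List.mem_cons_of_mem _ hm)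
    simp [lastEqIdx, hc, ih hcs]

theorem lastEqIdx_split (p t : List Char) (h : '=' ∉ t) (i idx : Int) :
    lastEqIdx (p ++ '=' :: t) i idx = i + p.length := by
  induction p generalizing i idx with
  | nil => simp [lastEqIdx, lastEqIdx_no t h]
  | cons c cs ih =>
    simp only [List.cons_append, lastEqIdx, ih (i+1), List.length_cons]
    push_cast
    ring

theorem split_last (l : List Char) (h : '=' ∈ l) :
    ∃ p t, l = p ++ '=' :: t ∧ '=' ∉ t := by
  induction l with
  | nil => cases h
  | cons c cs ih =>
    by_cases hm : '=' ∈ cs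
    · obtain ⟨p, t, rfl, ht⟩ := ih hm
      exact ⟨c :: p, t, rfl, ht⟩
    · have : c = '=' := by
        rcases List.mem_cons.mp h with h' | h'
        · exact h'.symm
        · exact absurd h' hm
      exact ⟨[], cs, by simp [this], hm⟩

theorem getLastNum_eq_alt (s : String) : getLastNum s = getLastNum_alt s := by
  unfold getLastNum getLastNum_alt
  dsimp only
  set l := s.toList with hl
  clear_value l
  by_cases h : '=' ∈ l
  · obtain ⟨p, t, rfl, ht⟩ := split_last l h
    rw [lastEqIdx_split p t ht]
    rw [PySem.List.slice_from _ (by push_cast; omega)]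
    rw [show ((0 : Int) + ↑p.length + 1).toNat = p.length + 1 by omega]
    have h2 : (p ++ '=' :: t).drop (p.length + 1) = t := by
      have : p ++ '=' :: t = (p ++ ['=']) ++ t := by simp
      rw [this, show p.length + 1 = (p ++ ['=']).length by simp, List.drop_left]
    rw [h2]
    have h3 : (p ++ '=' :: t).reverse = t.reverse ++ '=' :: p.reverse := by simp
    rw [h3, loopA_block t _ ht]
    simp [loopA]
  · rw [lastEqIdx_no l h]
    norm_num
    have := loopA_block l [] h 0 1
    simp [loopA] at this
    push_cast
    simpa using this

-- ===== VERDICT (by name: the statement is the Claim_ definition above) =====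
theorem getLastNum_spec : Claim_equal_getLastNum := by
  intro s _
  exact getLastNum_eq_alt s
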